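-- pv_equiv track=rewrite | github.com/ligeaaa/CommunityDetection | algorithm/common/util/check/get_dataset_information.py | is_overlapping_community
-- ===== SOURCE A (Python) =====
-- from collections import defaultdict
--
-- def is_overlapping_community(truth_table):
--     """
--     Determines whether the given community structure in `truth_table` represents overlapping communities.
--     """
--     node_to_communities = defaultdict(set)
--     for node, community in truth_table:
--         node_to_communities[node].add(community)
--
--     for communities in node_to_communities.values():
--         if len(communities) > 1:
--             return True
--     return False
-- ===== SOURCE B (Python) =====
-- def is_overlapping_community(truth_table):
--     seen = {}
--     for node, community in truth_table:
--         if node in seen and seen[node] != community: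
--             return True
--         seen[node] = community
--     return False
-- ===== Notes on version B (the rewrite author's own statement) =====
-- stated objective: alternative
-- what changed: Replaces A's two-phase build-a-dict-of-sets-then-scan with a single streaming pass that keeps one representative community per node and returns True at the first conflicting pair.
import Mathlib
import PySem

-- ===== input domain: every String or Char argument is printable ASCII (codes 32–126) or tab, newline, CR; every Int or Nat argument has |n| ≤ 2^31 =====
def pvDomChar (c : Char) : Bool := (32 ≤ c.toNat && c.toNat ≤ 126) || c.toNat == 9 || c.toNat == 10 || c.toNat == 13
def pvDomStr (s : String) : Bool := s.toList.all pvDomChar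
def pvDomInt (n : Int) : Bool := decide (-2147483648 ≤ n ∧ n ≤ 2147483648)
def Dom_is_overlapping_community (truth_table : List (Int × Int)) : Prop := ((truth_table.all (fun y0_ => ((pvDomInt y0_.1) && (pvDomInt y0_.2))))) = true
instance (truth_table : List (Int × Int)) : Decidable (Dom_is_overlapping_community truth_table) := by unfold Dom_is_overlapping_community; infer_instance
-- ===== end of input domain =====

-- B replaces A's build-a-dict-of-sets-then-scan with one streaming pass keeping a single
-- representative community per node and exiting on the first conflicting pair (alternative decomposition).


-- ===== PORT A =====
-- node_to_communities = defaultdict(set)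
-- for node, community in truth_table: node_to_communities[node].add(community)
-- for communities in node_to_communities.values():
--     if len(communities) > 1: return True
-- return False
def is_overlapping_community (truth_table : List (Int × Int)) : Bool :=
  let node_to_communities : PySem.Dict Int (PySem.Set Int) :=
    truth_table.foldl
      (fun d p => d.modify p.1 PySem.Set.empty (fun s => PySem.Set.add s p.2))
      PySem.Dict.empty
  node_to_communities.values.any (fun communities => decide (1 < PySem.Set.len communities))

-- ===== PORT B =====
-- seen = {}
-- for node, community in truth_table:
--     if node in seen and seen[node] != community: return True
--     seen[node] = community
-- return False
def is_overlapping_community_altGo (seen : PySem.Dict Int Int) :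
    List (Int × Int) → Bool
  | [] => false
  | (node, community) :: rest =>
      if seen.contains node && (seen.get? node != some community) then true
      else is_overlapping_community_altGo (seen.insert node community) rest

def is_overlapping_community_alt (truth_table : List (Int × Int)) : Bool :=
  is_overlapping_community_altGo PySem.Dict.empty truth_table

-- ===== PRECONDITION & SPEC =====
def Spec_is_overlapping_community (truth_table : List (Int × Int)) (out : Bool) : Prop := out = is_overlapping_community_alt truth_table
instance (truth_table : List (Int × Int)) (out : Bool) : Decidable (Spec_is_overlapping_community truth_table out) := by unfold Spec_is_overlapping_community; infer_instance

-- ===== CLAIM (what is proved, stated in full; the proofs are below) =====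
def Claim_equal_is_overlapping_community : Prop := ∀ (truth_table : List (Int × Int)), Dom_is_overlapping_community truth_table → Spec_is_overlapping_community truth_table (is_overlapping_community truth_table)

-- ===== LEMMAS AND PROOFS =====

-- Some node occurs with two different communities.
def pvConflict (l : List (Int × Int)) : Prop :=
  ∃ p ∈ l, ∃ q ∈ l, p.1 = q.1 ∧ p.2 ≠ q.2

-- A-side invariant: the accumulated set at key n is the set of communities paired with n.
lemma pvGetD_build (l : List (Int × Int)) (d : PySem.Dict Int (PySem.Set Int)) (n : Int) :
    (l.foldl (fun d p => d.modify p.1 PySem.Set.empty (fun s => PySem.Set.add s p.2)) d).getD n PySem.Set.empty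
      = PySem.Set.update (d.getD n PySem.Set.empty) ((l.filter (fun p => p.1 == n)).map (·.2)) := by
  induction l generalizing d with
  | nil => simp [PySem.Set.update]
  | cons p rest ih =>
      simp only [List.foldl_cons, ih, List.filter_cons]
      by_cases h : p.1 = n
      · simp [h, PySem.Set.update]
      · have h' : ¬ n = p.1 := fun hh => h hh.symm
        simp [h, h', PySem.Dict.getD_modify]

lemma pvA_true_iff (l : List (Int × Int)) :
    is_overlapping_community l = true ↔ pvConflict l := by
  unfold is_overlapping_community
  set build := l.foldl
      (fun d p => d.modify p.1 PySem.Set.empty (fun s => PySem.Set.add s p.2))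
      PySem.Dict.empty with hb
  have hnd : build.keys.Nodup := by
    exact PySem.Dict.nodup_keys_foldl_modify_key l Prod.fst PySem.Set.empty
      (fun d x => fun s => PySem.Set.add s x.2) PySem.Dict.empty (by simp)
  have hkeys : build.keys = PySem.Set.ofList (l.map Prod.fst) := by
    rw [hb, PySem.Dict.keys_foldl_modify_key]
    simp [PySem.Set.update, PySem.Set.ofList]
  have hval := PySem.Dict.values_eq_map_keys build hnd PySem.Set.empty
  have hget : ∀ n, build.getD n PySem.Set.empty
      = PySem.Set.ofList ((l.filter (fun p => p.1 == n)).map (·.2)) := by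
    intro n
    rw [hb, pvGetD_build]
    simp [PySem.Set.update, PySem.Set.ofList]
  show (build.values.any fun communities => decide (1 < PySem.Set.len communities)) = true ↔ pvConflict l
  rw [hval, hkeys]
  simp only [List.any_eq_true, List.mem_map, decide_eq_true_eq]
  constructor
  · rintro ⟨s, ⟨n, hn, rfl⟩, hlen⟩
    rw [hget n] at hlen
    set cs := (l.filter (fun p => p.1 == n)).map (·.2) with hcs
    have hlen' : 1 < (PySem.Set.ofList cs).length := by
      simpa [PySem.Set.len] using hlen
    have hnodup := PySem.Set.nodup_ofList (α := Int) (xs := cs)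
    obtain ⟨a, b, t, hs⟩ : ∃ a b t, PySem.Set.ofList cs = a :: b :: t := by
      rcases h : PySem.Set.ofList cs with _ | ⟨a, _ | ⟨b, t⟩⟩
      · rw [h] at hlen'; simp at hlen'
      · rw [h] at hlen'; simp at hlen'
      · exact ⟨a, b, _, rfl⟩
    have hane : a ≠ b := by
      rw [hs] at hnodup
      simp [List.nodup_cons] at hnodup
      exact fun hh => hnodup.1.1 hh
    have ha : a ∈ cs := by
      have : a ∈ PySem.Set.ofList cs := by rw [hs]; simp
      exact (PySem.Set.mem_ofList _ _).1 this
    have hbmem : b ∈ cs := by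
      have : b ∈ PySem.Set.ofList cs := by rw [hs]; simp
      exact (PySem.Set.mem_ofList _ _).1 this
    rw [hcs] at ha hbmem
    obtain ⟨p, hp, hpa⟩ := List.mem_map.1 ha
    obtain ⟨q, hq, hqb⟩ := List.mem_map.1 hbmem
    obtain ⟨hpl, hpn⟩ := List.mem_filter.1 hp
    obtain ⟨hql, hqn⟩ := List.mem_filter.1 hq
    refine ⟨p, hpl, q, hql, ?_, ?_⟩
    · simp only [beq_iff_eq] at hpn hqn; rw [hpn, hqn]
    · rw [hpa, hqb]; exact hane
  · rintro ⟨p, hp, q, hq, hnn, hne⟩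
    refine ⟨build.getD p.1 PySem.Set.empty, ⟨p.1, ?_, rfl⟩, ?_⟩
    · exact (PySem.Set.mem_ofList _ _).2 (List.mem_map.2 ⟨p, hp, rfl⟩)
    · rw [hget p.1]
      have hpm : p.2 ∈ (l.filter (fun r => r.1 == p.1)).map (·.2) :=
        List.mem_map.2 ⟨p, List.mem_filter.2 ⟨hp, by simp⟩, rfl⟩
      have hqm : q.2 ∈ (l.filter (fun r => r.1 == p.1)).map (·.2) :=
        List.mem_map.2 ⟨q, List.mem_filter.2 ⟨hq, by simp [hnn.symm]⟩, rfl⟩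
      have hpm' := (PySem.Set.mem_ofList _ _).2 hpm
      have hqm' := (PySem.Set.mem_ofList _ _).2 hqm
      rcases h : PySem.Set.ofList ((l.filter (fun r => r.1 == p.1)).map (·.2)) with _ | ⟨a, _ | ⟨b, t⟩⟩
      · rw [h] at hpm'; simp at hpm'
      · rw [h] at hpm' hqm'
        simp at hpm' hqm'
        exact absurd (hpm'.trans hqm'.symm) hne
      · simp [PySem.Set.len, h]

-- B-side step: folding one pair (n, c) into `seen` preserves the no-conflict reading,
-- provided `seen` does not already contradict c at n.
lemma pvStep_iff (seen : PySem.Dict Int Int) (n c : Int) (rest : List (Int × Int))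
    (hsn : seen.get? n = none ∨ seen.get? n = some c) :
    (∀ p ∈ rest, (∀ c', (seen.insert n c).get? p.1 = some c' → c' = p.2) ∧
                 (∀ q ∈ rest, q.1 = p.1 → q.2 = p.2)) ↔
    (∀ p ∈ (n, c) :: rest, (∀ c', seen.get? p.1 = some c' → c' = p.2) ∧
                 (∀ q ∈ (n, c) :: rest, q.1 = p.1 → q.2 = p.2)) := by
  constructor
  · intro h p hp
    rcases List.mem_cons.1 hp with rfl | hp'
    · refine ⟨?_, ?_⟩
      · intro c' hg
        rcases hsn with hsn | hsn
        · rw [hsn] at hg; exact absurd hg (by simp)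
        · rw [hsn] at hg; exact (Option.some_inj.1 hg).symm
      · intro q hq hqn
        rcases List.mem_cons.1 hq with rfl | hq'
        · rfl
        · have hg : (seen.insert n c).get? q.1 = some c := by
            simp [hqn]
          exact ((h q hq').1 c hg).symm
    · have hh := h p hp'
      refine ⟨?_, ?_⟩
      · intro c' hg
        by_cases hpn : p.1 = n
        · have hcp : c = p.2 := hh.1 c (by simp [hpn])
          rcases hsn with hsn | hsn
          · rw [hpn, hsn] at hg; exact absurd hg (by simp)
          · rw [hpn, hsn] at hg
            exact (Option.some_inj.1 hg) ▸ hcp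
        · exact hh.1 c' (by simp [PySem.Dict.get?_insert, hpn]; exact hg)
      · intro q hq hqn
        rcases List.mem_cons.1 hq with rfl | hq'
        · exact hh.1 (n, c).2 (by simp [hqn.symm])
        · exact hh.2 q hq' hqn
  · intro h p hp
    have hh := h p (List.mem_cons_of_mem _ hp)
    refine ⟨?_, ?_⟩
    · intro c' hg
      by_cases hpn : p.1 = n
      · rw [hpn, PySem.Dict.get?_insert_self] at hg
        have hcc : p.2 = c :=
          (h (n, c) (by simp)).2 p (List.mem_cons_of_mem _ hp) hpn
        rw [← Option.some_inj.1 hg, hcc]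
      · refine hh.1 c' ?_
        rw [PySem.Dict.get?_insert] at hg
        rwa [if_neg hpn] at hg
    · intro q hq hqn
      exact hh.2 q (List.mem_cons_of_mem _ hq) hqn

-- B-side invariant: the loop returns False iff `seen` and the remaining pairs are conflict-free.
lemma pvAltGo_false_iff (l : List (Int × Int)) :
    ∀ seen : PySem.Dict Int Int,
      is_overlapping_community_altGo seen l = false ↔
        (∀ p ∈ l, (∀ c', seen.get? p.1 = some c' → c' = p.2) ∧
                  (∀ q ∈ l, q.1 = p.1 → q.2 = p.2)) := by
  induction l with
  | nil => simp [is_overlapping_community_altGo]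
  | cons hd rest ih =>
      obtain ⟨n, c⟩ := hd
      intro seen
      rw [is_overlapping_community_altGo]
      have hcs : seen.contains n = (seen.get? n).isSome :=
        PySem.Dict.contains_eq_isSome_get? _ _
      cases hsn : seen.get? n with
      | none =>
          rw [hcs, hsn]
          simp only [Option.isSome_none, Bool.false_and, Bool.false_eq_true, if_false]
          rw [ih (seen.insert n c)]
          exact pvStep_iff seen n c rest (Or.inl hsn)
      | some c0 =>
          by_cases hc0 : c0 = c
          · rw [hcs, hsn, hc0]
            simp only [Option.isSome_some, Bool.true_and, bne_self_eq_false,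
              Bool.false_eq_true, if_false]
            rw [ih (seen.insert n c)]
            exact pvStep_iff seen n c rest (Or.inr (hc0 ▸ hsn))
          · rw [hcs, hsn]
            have : (some c0 != some c) = true := by simp [hc0]
            simp only [Option.isSome_some, Bool.true_and, this, if_true]
            constructor
            · intro h; exact absurd h (by simp)
            · intro h
              exfalso
              exact hc0 ((h (n, c) (by simp)).1 c0 hsn)

lemma pvAlt_true_iff (l : List (Int × Int)) :
    is_overlapping_community_alt l = true ↔ pvConflict l := by
  have key : is_overlapping_community_altGo PySem.Dict.empty l = false ↔ ¬ pvConflict l := by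
    rw [pvAltGo_false_iff l PySem.Dict.empty]
    constructor
    · rintro hP ⟨p, hp, q, hq, h1, h2⟩
      exact h2 ((hP p hp).2 q hq h1.symm).symm
    · intro hnc p hp
      refine ⟨?_, ?_⟩
      · intro c' hg
        rw [PySem.Dict.get?_empty] at hg
        exact absurd hg (by simp)
      · intro q hq hqn
        by_contra hne
        exact hnc ⟨q, hq, p, hp, hqn, hne⟩
  unfold is_overlapping_community_alt
  cases hv : is_overlapping_community_altGo PySem.Dict.empty l
  · simp only [Bool.false_eq_true, false_iff]
    exact fun hc => (key.1 hv) hc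
  · simp only [true_iff]
    by_contra hc
    rw [key.2 hc] at hv
    exact absurd hv (by simp)

-- ===== VERDICT (by name: the statement is the Claim_ definition above) =====
theorem is_overlapping_community_spec : Claim_equal_is_overlapping_community := by
  intro l _
  unfold Spec_is_overlapping_community
  have h := (pvA_true_iff l).trans (pvAlt_true_iff l).symm
  cases ha : is_overlapping_community l <;> cases hb : is_overlapping_community_alt l <;>
    simp_all
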